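-- pv_equiv track=rewrite | github.com/Yongjin9660/Algorithm | 프로그래머스/Level1/신규 아이디 추천.py | solution
-- ===== SOURCE A (Python) =====
-- def solution(new_id):
--     new_id = new_id.lower()
--     answer = ''
--     for i in new_id:
--         if i.isdigit() or i.isalpha() or i in ['-','_','.']:
--             answer += i
--     while '..' in answer:
--         answer = answer.replace('..', '.')
--     if answer[0] == '.' and len(answer) > 1:
--         answer = answer[1:]
--     elif answer[0] == '.':
--         answer = ''
--     if len(answer) != 0 and answer[len(answer)-1]=='.':
--         answer = answer[:len(answer)-1]
--     if len(answer) == 0: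
--         answer = 'a'
--     if len(answer) >= 16:
--         answer = answer[:15]
--         if answer[14] == '.':
--             answer = answer[:14]
--     while len(answer) < 3:
--         answer += answer[len(answer) - 1]
--     return answer
-- ===== SOURCE B (Python) =====
-- def solution(new_id):
--     out = []
--     for c in new_id.lower():
--         if (c.isalnum() or c in '-_.') and not (c == '.' and out and out[-1] == '.'):
--             out.append(c)
--     s = ''.join(out).strip('.')
--     if not s:
--         s = 'a'
--     s = s[:15].rstrip('.')
--     return s.ljust(3, s[-1])
-- ===== Notes on version B (the rewrite author's own statement) =====
-- stated objective: simpler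
-- what changed: B replaces A's two separate scans (a character-filter loop building a string, then a repeated substring-test/replace loop that re-scans until no double dot remains) by a single pass that filters and collapses dot runs together using the last kept character, and replaces A's branchy leading/trailing-dot and truncation code with strip/rstrip/ljust.
import Mathlib
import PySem

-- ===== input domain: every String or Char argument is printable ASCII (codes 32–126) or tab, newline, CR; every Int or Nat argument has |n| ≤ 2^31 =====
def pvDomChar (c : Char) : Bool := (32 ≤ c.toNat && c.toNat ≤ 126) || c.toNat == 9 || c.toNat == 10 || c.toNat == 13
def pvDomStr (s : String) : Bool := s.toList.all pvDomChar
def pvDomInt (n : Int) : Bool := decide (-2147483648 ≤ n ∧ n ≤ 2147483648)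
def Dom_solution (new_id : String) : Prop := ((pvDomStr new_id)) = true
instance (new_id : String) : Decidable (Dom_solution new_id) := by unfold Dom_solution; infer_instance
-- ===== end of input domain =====

-- B replaces A's append-filter loop plus the repeated '..'-replace while-loop by one pass that
-- filters and collapses dot runs together, then uses strip/rstrip/ljust for the tail (simpler).


-- ===== PORT A =====
-- Helpers needed BEFORE the port: termination of A's `while '..' in answer` loop.
-- pvRep is the value of one Python `answer.replace('..', '.')` pass (left-to-right, non-overlapping);
-- it is used only to prove the loop's length measure decreases (and again in the proofs below).
def pvRep : List Char → List Char
  | [] => []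
  | [c] => [c]
  | a :: b :: t => if a = '.' ∧ b = '.' then '.' :: pvRep t else a :: pvRep (b :: t)
termination_by l => l.length
decreasing_by all_goals simp

theorem pvRep_cons_of_not_prefix (c : Char) (t : List Char) (h : ¬ (['.', '.'] <+: c :: t)) :
    pvRep (c :: t) = c :: pvRep t := by
  cases t with
  | nil => simp [pvRep]
  | cons b t' =>
    rw [pvRep]
    rw [if_neg]
    intro ⟨hc, hb⟩
    exact h (by simp [List.cons_prefix_cons, hc, hb])

theorem pv_go_eq_rep (fuel : Nat) : ∀ (l acc : List Char), l.length ≤ fuel →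
    PySem.Chars.replace.go ['.', '.'] ['.'] fuel l acc = acc.reverse ++ pvRep l := by
  induction fuel with
  | zero =>
    intro l acc h
    have : l = [] := by cases l <;> simp_all
    subst this
    simp [PySem.Chars.replace.go, pvRep]
  | succ n ih =>
    intro l acc h
    cases l with
    | nil => simp [PySem.Chars.replace.go, pvRep]
    | cons c t =>
      rw [PySem.Chars.replace.go]
      by_cases hp : (['.', '.'] : List Char).isPrefixOf (c :: t)
      · have hpre : ['.', '.'] <+: c :: t := List.isPrefixOf_iff_prefix.mp hp
        obtain ⟨r, hr⟩ := hpre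
        simp at hr
        obtain ⟨hc, ht⟩ := hr
        subst hc ht
        rw [if_pos hp]
        simp at h
        rw [show List.drop (['.', '.'] : List Char).length ('.' :: '.' :: r) = r from rfl,
          show (['.'] : List Char).reverse ++ acc = '.' :: acc from rfl]
        rw [ih r ('.' :: acc) (by omega)]
        simp [pvRep]
      · rw [if_neg hp]
        simp at h
        rw [ih t (c :: acc) (by omega)]
        rw [pvRep_cons_of_not_prefix c t (fun hpre => hp (List.isPrefixOf_iff_prefix.mpr hpre))]
        simp

theorem pv_replace_dd (l : List Char) : PySem.Chars.replace l ['.', '.'] ['.'] = pvRep l := by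
  rw [PySem.Chars.replace]
  rw [if_neg (by simp)]
  rw [pv_go_eq_rep l.length l [] le_rfl]
  simp

theorem pvRep_length_le (l : List Char) : (pvRep l).length ≤ l.length := by
  fun_induction pvRep l with
  | case1 => simp
  | case2 => simp
  | case3 a b t h ih => simp only [List.length_cons]; omega
  | case4 a b t h ih => simpa using ih

theorem pvRep_length_lt (l : List Char) (h : ['.', '.'] <:+: l) : (pvRep l).length < l.length := by
  fun_induction pvRep l with
  | case1 => exact absurd h.length_le (by simp)
  | case2 => exact absurd h.length_le (by simp)
  | case3 a b t _ _ => have := pvRep_length_le t; simp; omega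
  | case4 a b t hab ih =>
    have : ['.', '.'] <:+: b :: t := by
      rcases List.infix_cons_iff.mp h with hp | hi
      · rcases List.cons_prefix_cons.mp hp with ⟨h1, h2⟩
        rcases List.cons_prefix_cons.mp h2 with ⟨h3, _⟩
        exact absurd ⟨h1.symm, h3.symm⟩ hab
      · exact hi
    simpa using ih this

-- A's `while '..' in answer: answer = answer.replace('..', '.')`
def pvDedupLoop (s : List Char) : List Char :=
  if h : PySem.Chars.isIn ['.', '.'] s = true then
    pvDedupLoop (PySem.Chars.replace s ['.', '.'] ['.'])
  else s
termination_by s.length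
decreasing_by
  rw [pv_replace_dd]
  exact pvRep_length_lt s ((PySem.Chars.isIn_iff_infix _ _).mp h)

-- A's `while len(answer) < 3: answer += answer[len(answer) - 1]`  (answer is nonempty there;
-- the getLastD default is never read on inputs satisfying Pre_)
def pvPadLoop (s : List Char) : List Char :=
  if s.length < 3 then pvPadLoop (s ++ [s.getLastD ' ']) else s
termination_by 3 - s.length
decreasing_by simp; omega

def solution (new_id : String) : String :=
  let nid := PySem.Chars.lower new_id.toList
  let answer : List Char := nid.foldl (fun acc i =>
    if (PySem.Chars.isdigit i || PySem.Chars.isalpha i || ['-', '_', '.'].contains i) = true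
    then acc ++ [i] else acc) []
  let answer := pvDedupLoop answer
  -- `answer[0]` raises IndexError on an empty answer: those inputs are outside Pre_ (pyGet? = none there)
  let answer :=
    if PySem.List.pyGet? answer 0 = some '.' ∧ answer.length > 1 then
      PySem.List.slice answer (some 1) none
    else if PySem.List.pyGet? answer 0 = some '.' then ([] : List Char)
    else answer
  let answer :=
    if answer.length ≠ 0 ∧ PySem.List.pyGet? answer ((answer.length : Int) - 1) = some '.' then
      PySem.List.slice answer none (some ((answer.length : Int) - 1))
    else answer
  let answer := if answer.length = 0 then ['a'] else answer
  let answer :=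
    if answer.length ≥ 16 then
      let a15 := PySem.List.slice answer none (some 15)
      if PySem.List.pyGet? a15 14 = some '.' then PySem.List.slice a15 none (some 14) else a15
    else answer
  String.ofList (pvPadLoop answer)

-- ===== PORT B =====
-- s.rstrip('.')  (ported by hand: drop the trailing run of '.', exact for a one-char strip set)
def pvRstripDot (l : List Char) : List Char := (l.reverse.dropWhile (fun c => c == '.')).reverse

def solution_alt (new_id : String) : String :=
  let out : List Char := (PySem.Chars.lower new_id.toList).foldl (fun out c =>
    if ((PySem.Chars.isalnum c || c == '-' || c == '_' || c == '.')
        && !(c == '.' && out.getLast? == some '.')) = true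
    then out ++ [c] else out) []
  let s := PySem.Chars.stripChars out ['.']
  let s := if s = [] then ['a'] else s
  let s := pvRstripDot (PySem.List.slice s none (some 15))
  String.ofList (s ++ List.replicate (3 - s.length) (s.getLastD ' '))

-- ===== PRECONDITION & SPEC =====
-- Pre_ excludes exactly the inputs that contain no admissible id character at all (no letter,
-- digit, hyphen, underscore or dot), on which A's `answer[0]` raises IndexError (A returns on
-- every other input).
def Pre_solution (new_id : String) : Prop :=
  ((PySem.Chars.lower new_id.toList).any
    (fun c => PySem.Chars.isalnum c || c == '-' || c == '_' || c == '.')) = true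
instance (new_id : String) : Decidable (Pre_solution new_id) := by unfold Pre_solution; infer_instance

def pvWitness_solution : String := "..Bad=ID+99"

def Spec_solution (new_id : String) (out : String) : Prop := out = solution_alt new_id
instance (new_id : String) (out : String) : Decidable (Spec_solution new_id out) := by
  unfold Spec_solution; infer_instance

-- ===== CLAIM (what is proved, stated in full; the proofs are below) =====
def Claim_equal_solution : Prop :=
  ∀ (new_id : String), Dom_solution new_id → Pre_solution new_id →
    Spec_solution new_id (solution new_id)

-- ===== LEMMAS AND PROOFS =====

-- adjacent pair of dots somewhere in the list
def pvHasDD : List Char → Bool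
  | [] => false
  | [_] => false
  | a :: b :: t => (a = '.' && b = '.') || pvHasDD (b :: t)
termination_by l => l.length
decreasing_by all_goals simp

-- one-pass collapse of runs of dots (the fixpoint of pvRep)
def pvCollapse : List Char → List Char
  | [] => []
  | [c] => [c]
  | a :: b :: t => if a = '.' ∧ b = '.' then pvCollapse (b :: t) else a :: pvCollapse (b :: t)
termination_by l => l.length
decreasing_by all_goals simp

-- collapse with an explicit "previous kept char" carry (the state of B's fold)
def pvCC : Option Char → List Char → List Char
  | _, [] => []
  | prev, c :: t => if c = '.' ∧ prev = some '.' then pvCC prev t else c :: pvCC (some c) t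

theorem pvHasDD_iff_infix (l : List Char) : pvHasDD l = true ↔ ['.', '.'] <:+: l := by
  fun_induction pvHasDD l with
  | case1 => simp
  | case2 c =>
    simp only [Bool.false_eq_true, false_iff]
    intro hinf
    exact absurd hinf.length_le (by simp)
  | case3 a b t ih =>
    rw [List.infix_cons_iff, ← ih]
    constructor
    · intro h
      rcases Bool.or_eq_true_iff.mp h with h | h
      · simp at h
        exact Or.inl (by simp [List.cons_prefix_cons, h.1, h.2])
      · exact Or.inr h
    · intro h
      rcases h with h | h
      · rcases List.cons_prefix_cons.mp h with ⟨h1, h2⟩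
        rcases List.cons_prefix_cons.mp h2 with ⟨h3, _⟩
        simp [← h1, ← h3]
      · simp [h]

theorem pvCollapse_of_not_hasDD (l : List Char) (h : pvHasDD l = false) : pvCollapse l = l := by
  fun_induction pvCollapse l with
  | case1 => rfl
  | case2 c => rfl
  | case3 a b t hab ih =>
    rw [pvHasDD] at h
    simp [hab.1, hab.2] at h
  | case4 a b t hab ih =>
    rw [pvHasDD] at h
    simp only [Bool.or_eq_false_iff] at h
    rw [ih h.2]

theorem pvCollapse_cons_eq_CC (t : List Char) : ∀ a, pvCollapse (a :: t) = a :: pvCC (some a) t := by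
  induction t with
  | nil => intro a; simp [pvCollapse, pvCC]
  | cons c t' ih =>
    intro a
    rw [pvCollapse, pvCC]
    by_cases h : c = '.' ∧ a = '.'
    · rw [if_pos ⟨h.2, h.1⟩, if_pos (by simp [h.1, h.2])]
      rw [ih c, h.1, h.2]
    · rw [if_neg (fun hx => h ⟨hx.2, hx.1⟩), if_neg (by simpa using fun hx hy => h ⟨hx, by simp [hy]⟩)]
      rw [ih c]

theorem pvHasDD_cons_CC (t : List Char) : ∀ a, pvHasDD (a :: pvCC (some a) t) = false := by
  induction t with
  | nil => intro a; simp [pvHasDD, pvCC]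
  | cons c t' ih =>
    intro a
    rw [pvCC]
    by_cases h : c = '.' ∧ some a = some ('.' : Char)
    · rw [if_pos h]
      exact ih a
    · rw [if_neg h, pvHasDD]
      simp only [Bool.or_eq_false_iff]
      refine ⟨?_, ih c⟩
      simp only [Bool.and_eq_false_iff, decide_eq_false_iff_not]
      by_cases ha : a = '.'
      · exact Or.inr (fun hc => h ⟨hc, by rw [ha]⟩)
      · exact Or.inl ha

theorem pvHasDD_collapse (l : List Char) : pvHasDD (pvCollapse l) = false := by
  cases l with
  | nil => simp [pvCollapse, pvHasDD]
  | cons a t => rw [pvCollapse_cons_eq_CC]; exact pvHasDD_cons_CC t a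

theorem pvCollapse_rep_cons (l : List Char) : ∀ c, pvCollapse (c :: pvRep l) = pvCollapse (c :: l) := by
  fun_induction pvRep l with
  | case1 => intro c; rfl
  | case2 x => intro c; rfl
  | case3 a b t hab ih =>
    intro c
    obtain ⟨ha, hb⟩ := hab
    subst ha; subst hb
    by_cases hc : c = '.'
    · subst hc
      rw [pvCollapse, if_pos ⟨rfl, rfl⟩, ih '.']
      rw [show pvCollapse ('.' :: '.' :: '.' :: t) = pvCollapse ('.' :: '.' :: t) from
        by rw [pvCollapse, if_pos ⟨rfl, rfl⟩]]
      rw [show pvCollapse ('.' :: '.' :: t) = pvCollapse ('.' :: t) from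
        by rw [pvCollapse, if_pos ⟨rfl, rfl⟩]]
    · rw [pvCollapse, if_neg (fun hx => hc hx.1), ih '.']
      rw [show pvCollapse (c :: '.' :: '.' :: t) = c :: pvCollapse ('.' :: '.' :: t) from
        by rw [pvCollapse, if_neg (fun hx => hc hx.1)]]
      rw [show pvCollapse ('.' :: '.' :: t) = pvCollapse ('.' :: t) from
        by rw [pvCollapse, if_pos ⟨rfl, rfl⟩]]
  | case4 a b t hab ih =>
    intro c
    by_cases hca : c = '.' ∧ a = '.'
    · rw [pvCollapse, if_pos ⟨hca.1, hca.2⟩, ih a]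
      rw [show pvCollapse (c :: a :: b :: t) = pvCollapse (a :: b :: t) from
        by rw [pvCollapse, if_pos ⟨hca.1, hca.2⟩]]
    · rw [pvCollapse, if_neg hca, ih a]
      rw [show pvCollapse (c :: a :: b :: t) = c :: pvCollapse (a :: b :: t) from
        by rw [pvCollapse, if_neg hca]]

theorem pvCollapse_rep (l : List Char) : pvCollapse (pvRep l) = pvCollapse l := by
  cases l with
  | nil => simp [pvRep]
  | cons a t =>
    cases t with
    | nil => simp [pvRep]
    | cons b t' =>
      by_cases hab : a = '.' ∧ b = '.'
      · rw [pvRep, if_pos hab, pvCollapse_rep_cons t' '.']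
        obtain ⟨ha, hb⟩ := hab; subst ha; subst hb
        rw [show pvCollapse ('.' :: '.' :: t') = pvCollapse ('.' :: t') from
          by rw [pvCollapse, if_pos ⟨rfl, rfl⟩]]
      · rw [pvRep, if_neg hab, pvCollapse_rep_cons (b :: t') a]

theorem pvDedupLoop_eq_collapse (s : List Char) : pvDedupLoop s = pvCollapse s := by
  fun_induction pvDedupLoop s with
  | case1 s h ih => rw [ih, pv_replace_dd, pvCollapse_rep]
  | case2 s h =>
    have hdd : pvHasDD s = false := by
      rw [← Bool.not_eq_true, pvHasDD_iff_infix]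
      exact (PySem.Chars.isIn_eq_false_iff _ _).mp (Bool.not_eq_true _ ▸ eq_false_of_ne_true h)
    exact (pvCollapse_of_not_hasDD s hdd).symm

theorem pvCC_none (l : List Char) : pvCC none l = pvCollapse l := by
  cases l with
  | nil => simp [pvCC, pvCollapse]
  | cons a t =>
    rw [pvCC, if_neg (by simp), pvCollapse_cons_eq_CC]

theorem pvFoldB_eq (l : List Char) : ∀ acc : List Char,
    l.foldl (fun out c =>
      if ((PySem.Chars.isalnum c || c == '-' || c == '_' || c == '.')
          && !(c == '.' && out.getLast? == some '.')) = true
      then out ++ [c] else out) acc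
    = acc ++ pvCC acc.getLast?
        (l.filter (fun c => PySem.Chars.isalnum c || c == '-' || c == '_' || c == '.')) := by
  induction l with
  | nil => intro acc; simp [pvCC]
  | cons c t ih =>
    intro acc
    rw [List.foldl_cons, List.filter_cons]
    by_cases hk : (PySem.Chars.isalnum c || c == '-' || c == '_' || c == '.') = true
    · rw [if_pos hk]
      by_cases hs : c = '.' ∧ acc.getLast? = some '.'
      · have hb : (c == '.' && acc.getLast? == some ('.' : Char)) = true := by
          simp [hs.1, hs.2]
        rw [if_neg (by rw [hb]; simp), ih acc, pvCC, if_pos hs]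
      · have hb : (c == '.' && acc.getLast? == some ('.' : Char)) = false := by
          simp only [Bool.and_eq_false_iff, beq_eq_false_iff_ne, ne_eq]
          by_cases h1 : c = '.'
          · exact Or.inr (fun h2 => hs ⟨h1, h2⟩)
          · exact Or.inl h1
        rw [if_pos (by rw [hk, hb]; rfl), ih (acc ++ [c]), List.getLast?_concat, pvCC, if_neg hs]
        simp
    · have hk' : (PySem.Chars.isalnum c || c == '-' || c == '_' || c == '.') = false :=
        eq_false_of_ne_true hk
      rw [if_neg (by simp [hk']), if_neg hk]
      exact ih acc

theorem pvPred_eq :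
    (fun i => PySem.Chars.isdigit i || PySem.Chars.isalpha i || (['-', '_', '.'] : List Char).contains i)
    = (fun c => PySem.Chars.isalnum c || c == '-' || c == '_' || c == '.') := by
  funext c
  simp only [PySem.Chars.isalnum, List.contains_cons, List.contains_nil]
  cases hd : PySem.Chars.isdigit c <;> cases ha : PySem.Chars.isalpha c <;>
    simp [beq_iff_eq, eq_comm, Bool.or_assoc]

theorem pvHasDD_mono (u v : List Char) (h : u <:+: v) (hv : pvHasDD v = false) :
    pvHasDD u = false := by
  cases hu : pvHasDD u with
  | false => rfl
  | true =>
    have hvt : pvHasDD v = true :=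
      (pvHasDD_iff_infix v).mpr (((pvHasDD_iff_infix u).mp hu).trans h)
    rw [hvt] at hv
    cases hv

theorem pvHasDD_reverse (l : List Char) : pvHasDD l.reverse = pvHasDD l := by
  have h : ∀ x : List Char, (['.', '.'] : List Char) <:+: x.reverse ↔ (['.', '.'] : List Char) <:+: x := by
    intro x
    conv_lhs => rw [show (['.', '.'] : List Char) = (['.', '.'] : List Char).reverse from rfl]
    exact List.reverse_infix
  cases hx : pvHasDD l with
  | true => exact (pvHasDD_iff_infix _).mpr ((h l).mpr ((pvHasDD_iff_infix _).mp hx))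
  | false =>
    cases hy : pvHasDD l.reverse with
    | false => rfl
    | true =>
      have hinf := (h l).mp ((pvHasDD_iff_infix _).mp hy)
      rw [(pvHasDD_iff_infix l).mpr hinf] at hx
      cases hx

theorem pvDropWhile_dot (p : Char → Bool) (hp : ∀ c, p c = true ↔ c = '.')
    (v : List Char) (h : pvHasDD v = false) :
    v.dropWhile p = if v.head? = some '.' then v.tail else v := by
  have hpf : ∀ c, ¬ c = '.' → p c = false := fun c hc => by
    cases hpc : p c with
    | false => rfl
    | true => exact absurd ((hp c).mp hpc) hc
  cases v with
  | nil => simp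
  | cons c t =>
    by_cases hc : c = '.'
    · subst hc
      rw [List.dropWhile_cons, if_pos ((hp '.').mpr rfl),
        if_pos (show (('.' :: t).head? = some ('.' : Char)) from rfl), List.tail_cons]
      cases t with
      | nil => simp
      | cons d t' =>
        have hd : ¬ d = '.' := by
          rw [pvHasDD] at h
          simp only [Bool.or_eq_false_iff, Bool.and_eq_false_iff, decide_eq_false_iff_not] at h
          rcases h.1 with h1 | h1
          · exact absurd trivial h1
          · exact h1
        rw [List.dropWhile_cons, if_neg (by simp [hpf d hd])]
    · rw [List.dropWhile_cons, if_neg (by simp [hpf c hc]), if_neg (by simp [hc])]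

theorem pvRstripDot_eq (x : List Char) (h : pvHasDD x = false) :
    pvRstripDot x = if x.getLast? = some '.' then x.dropLast else x := by
  rw [pvRstripDot, pvDropWhile_dot (fun c => c == '.') (by intro c; simp) x.reverse
    (by rw [pvHasDD_reverse]; exact h)]
  rw [List.head?_reverse]
  by_cases hlast : x.getLast? = some '.'
  · rw [if_pos hlast, if_pos hlast, List.tail_reverse, List.reverse_reverse]
  · rw [if_neg hlast, if_neg hlast, List.reverse_reverse]

theorem pvPadLoop_eq (v : List Char) :
    pvPadLoop v = v ++ List.replicate (3 - v.length) (v.getLastD ' ') := by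
  fun_induction pvPadLoop v with
  | case1 v hlt ih =>
    rw [ih, List.getLastD_concat]
    rw [show (3 - v.length) = (3 - (v ++ [v.getLastD ' ']).length) + 1 by simp; omega]
    rw [List.replicate_succ, List.append_assoc]
    rfl
  | case2 v hge =>
    rw [show (3 - v.length) = 0 by omega, List.replicate_zero, List.append_nil]

theorem pvCollapse_ne_nil (l : List Char) (h : l ≠ []) : pvCollapse l ≠ [] := by
  cases l with
  | nil => exact absurd rfl h
  | cons a t => rw [pvCollapse_cons_eq_CC]; simp

theorem pvFoldA_eq (l : List Char) :
    l.foldl (fun acc i =>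
      if (PySem.Chars.isdigit i || PySem.Chars.isalpha i || (['-', '_', '.'] : List Char).contains i) = true
      then acc ++ [i] else acc) []
    = l.filter (fun c => PySem.Chars.isalnum c || c == '-' || c == '_' || c == '.') := by
  have h := PySem.List.foldl_append_if
    (fun i => PySem.Chars.isdigit i || PySem.Chars.isalpha i || (['-', '_', '.'] : List Char).contains i)
    id l []
  simp only [List.map_id, List.nil_append] at h
  rw [pvPred_eq] at h
  exact h

-- ===== VERDICT (by name: the statement is the Claim_ definition above) =====
theorem solution_spec : Claim_equal_solution := by
  intro new_id hdom hpre
  unfold Spec_solution solution solution_alt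
  refine congrArg String.ofList ?_
  rw [pvFoldA_eq, pvDedupLoop_eq_collapse, pvFoldB_eq]
  simp only [List.getLast?_nil, List.nil_append, pvCC_none]
  set F := (PySem.Chars.lower new_id.toList).filter
    (fun c => PySem.Chars.isalnum c || c == '-' || c == '_' || c == '.') with hF
  have hFne : F ≠ [] := by
    rw [Pre_solution] at hpre
    rcases List.any_eq_true.mp hpre with ⟨x, hx, hpx⟩
    rw [hF]
    intro hnil
    exact absurd hpx (by simpa using (List.filter_eq_nil_iff.mp hnil) x hx)
  set T := pvCollapse F with hT
  have hne : T ≠ [] := pvCollapse_ne_nil F hFne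
  have hdd : pvHasDD T = false := pvHasDD_collapse F
  clear_value T
  clear hF hT hFne hpre hdom F
  -- predicates used by the two strips
  have hpD : ∀ c : Char, ((fun c => (['.'] : List Char).contains c) c = true) ↔ c = '.' := by
    intro c; simp
  -- head access and first (leading-dot) step
  have hget0 : PySem.List.pyGet? T 0 = T.head? := by
    rw [show (0 : Int) = ((0 : Nat) : Int) from rfl, PySem.List.pyGet?_natCast]
    exact List.head?_eq_getElem?.symm
  set u := List.dropWhile (fun c => (['.'] : List Char).contains c) T with hu
  have hu_eq : u = if T.head? = some '.' then T.tail else T :=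
    pvDropWhile_dot _ hpD T hdd
  have ha2 : (if PySem.List.pyGet? T 0 = some '.' ∧ T.length > 1 then PySem.List.slice T (some 1) none
      else if PySem.List.pyGet? T 0 = some '.' then ([] : List Char) else T) = u := by
    rw [hget0, hu_eq]
    by_cases hh : T.head? = some '.'
    · by_cases hlen : T.length > 1
      · rw [if_pos ⟨hh, hlen⟩, if_pos hh, PySem.List.slice_from T (by norm_num),
          show ((1 : Int).toNat) = 1 from rfl, List.drop_one]
      · rw [if_neg (fun hx => hlen hx.2), if_pos hh, if_pos hh]
        cases T with
        | nil => exact absurd rfl hne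
        | cons a t =>
          cases t with
          | nil => rfl
          | cons b t' => exact absurd (by simp) hlen
    · rw [if_neg (fun hx => hh hx.1), if_neg hh, if_neg hh]
  have hddu : pvHasDD u = false :=
    pvHasDD_mono u T (List.dropWhile_suffix _).isInfix hdd
  -- the trailing-dot step agrees with stripChars
  have hstrip : PySem.Chars.stripChars T ['.'] = (if u.getLast? = some '.' then u.dropLast else u) := by
    rw [PySem.Chars.stripChars]
    rw [pvDropWhile_dot _ hpD u.reverse (by rw [pvHasDD_reverse]; exact hddu)]
    rw [List.head?_reverse]
    by_cases hl : u.getLast? = some '.'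
    · rw [if_pos hl, if_pos hl, List.tail_reverse, List.reverse_reverse]
    · rw [if_neg hl, if_neg hl, List.reverse_reverse]
  have ha3 : (if u.length ≠ 0 ∧ PySem.List.pyGet? u ((u.length : Int) - 1) = some '.' then
      PySem.List.slice u none (some ((u.length : Int) - 1)) else u) = PySem.Chars.stripChars T ['.'] := by
    rw [hstrip]
    by_cases hnil : u = []
    · simp [hnil]
    · have hlen1 : 1 ≤ u.length := List.length_pos_iff.mpr hnil
      have hcast : ((u.length : Int) - 1) = ((u.length - 1 : Nat) : Int) := by omega
      rw [hcast, PySem.List.pyGet?_natCast, ← List.getLast?_eq_getElem?]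
      by_cases hl : u.getLast? = some '.'
      · rw [if_pos ⟨by simpa using hnil, hl⟩, if_pos hl,
          PySem.List.slice_to u (Int.natCast_nonneg _), Int.toNat_natCast, ← List.dropLast_eq_take]
      · rw [if_neg (fun hx => hl hx.2), if_neg hl]
  rw [ha2, ha3]
  -- empty → 'a'
  set w := PySem.Chars.stripChars T ['.'] with hw
  have hww : w = if u.getLast? = some '.' then u.dropLast else u := hstrip
  set s2 := if w = [] then ['a'] else w with hs2
  have hA4 : (if w.length = 0 then ['a'] else w) = s2 := by
    by_cases hnil : w = []
    · rw [if_pos (by simp [hnil]), hs2, if_pos hnil]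
    · rw [if_neg (by simpa using hnil), hs2, if_neg hnil]
  rw [hA4]
  -- facts about s2
  have hdds2 : pvHasDD s2 = false := by
    rw [hs2]
    by_cases hnil : w = []
    · simp only [hnil, if_pos rfl]; simp [pvHasDD]
    · rw [if_neg hnil, hww]
      by_cases hl : u.getLast? = some '.'
      · rw [if_pos hl]
        exact pvHasDD_mono _ u (List.dropLast_prefix u).isInfix hddu
      · rw [if_neg hl]; exact hddu
  have hne2 : s2 ≠ [] := by
    rw [hs2]
    by_cases hnil : w = []
    · simp [hnil]
    · rw [if_neg hnil]; exact hnil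
  have hlast2 : s2.getLast? ≠ some '.' := by
    rw [hs2]
    by_cases hnil : w = []
    · simp [hnil]
    · rw [if_neg hnil, hww]
      by_cases hl : u.getLast? = some '.'
      · rw [if_pos hl]
        intro hcon
        have h1 : u.reverse.head? = some '.' := by rw [List.head?_reverse]; exact hl
        have h2 : u.reverse.tail.head? = some '.' := by
          rw [List.tail_reverse, List.head?_reverse]; exact hcon
        obtain ⟨r, hr⟩ : ∃ r, u.reverse = '.' :: '.' :: r := by
          cases hu1 : u.reverse with
          | nil => rw [hu1] at h1; cases h1
          | cons a t =>
            rw [hu1] at h1 h2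
            simp only [List.head?_cons, Option.some.injEq] at h1
            cases t with
            | nil => simp at h2
            | cons b t' =>
              simp only [List.tail_cons, List.head?_cons, Option.some.injEq] at h2
              exact ⟨t', by rw [h1, h2]⟩
        have hddr : pvHasDD u.reverse = true := by rw [hr, pvHasDD]; simp
        rw [pvHasDD_reverse] at hddr
        rw [hddr] at hddu
        cases hddu
      · rw [if_neg hl]; exact hl
  clear_value s2
  -- truncation step
  rw [PySem.List.slice_to s2 (by norm_num)]
  have h15 : ((15 : Int).toNat) = 15 := rfl
  rw [h15]
  by_cases h16 : s2.length ≥ 16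
  · rw [if_pos h16]
    set a15 := s2.take 15 with ha15
    have hlen15 : a15.length = 15 := by rw [ha15]; simp [List.length_take]; omega
    have hdd15 : pvHasDD a15 = false :=
      pvHasDD_mono _ s2 (List.take_prefix 15 s2).isInfix hdds2
    have hget14 : PySem.List.pyGet? a15 14 = a15.getLast? := by
      rw [show (14 : Int) = ((14 : Nat) : Int) from rfl, PySem.List.pyGet?_natCast,
        List.getLast?_eq_getElem?, hlen15]
    rw [hget14, pvRstripDot_eq a15 hdd15]
    by_cases hl : a15.getLast? = some '.'
    · rw [if_pos hl, if_pos hl, PySem.List.slice_to a15 (by norm_num),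
        show ((14 : Int).toNat) = 14 from rfl, List.dropLast_eq_take, hlen15]
      rw [pvPadLoop_eq]
    · rw [if_neg hl, if_neg hl, pvPadLoop_eq]
  · rw [if_neg h16, List.take_of_length_le (by omega), pvRstripDot_eq s2 hdds2, if_neg hlast2,
      pvPadLoop_eq]
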